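-- pv_equiv track=rewrite | github.com/Carricossauro/lcc | Treino 1/isbn.py | isbn
-- ===== SOURCE A (Python) =====
-- def isbn(livros):
--     result = []
--     for nome in livros:
--         isbn = livros[nome]
--         peso = 1
--         soma = 0
--         for k in map(int,isbn):
--             soma += k *peso
--             peso = 3 if peso == 1 else 1
--         if soma % 10 != 0:
--             result.append(nome)
--
--     result.sort()
--     return result
-- ===== SOURCE B (Python) =====
-- def isbn(livros):
--     def checksum(digits):
--         if len(digits) >= 2:
--             return digits[0] + 3 * digits[1] + checksum(digits[2:])
--         if digits:
--             return digits[0]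
--         return 0
--
--     invalid = [nome for nome, code in livros.items()
--                if checksum([int(c) for c in code]) % 10 != 0]
--     return sorted(invalid)
-- ===== Notes on version B (the rewrite author's own statement) =====
-- stated objective: alternative
-- what changed: The alternating-weight accumulator loop (soma/peso state machine) is replaced by a stateless recursive checksum that consumes the digits two at a time (d0 + 3*d1 per pair), and the filter is a comprehension over dict items instead of an append loop over keys.
import Mathlib
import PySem

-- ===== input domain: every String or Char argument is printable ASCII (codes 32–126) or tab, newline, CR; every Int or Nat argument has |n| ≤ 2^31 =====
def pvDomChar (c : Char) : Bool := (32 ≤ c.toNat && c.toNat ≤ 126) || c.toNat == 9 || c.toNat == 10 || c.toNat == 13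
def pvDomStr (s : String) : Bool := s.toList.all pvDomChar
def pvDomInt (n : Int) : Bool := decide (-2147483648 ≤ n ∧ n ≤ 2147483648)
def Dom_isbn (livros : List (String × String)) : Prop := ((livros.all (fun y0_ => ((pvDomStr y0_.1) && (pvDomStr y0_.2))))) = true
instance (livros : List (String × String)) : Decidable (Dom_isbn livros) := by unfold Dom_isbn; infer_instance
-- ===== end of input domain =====

-- B replaces A's alternating-weight state machine by a stateless pairwise (two-digits-at-a-time)
-- checksum recursion over the digit list; objective: alternative decomposition, same cost.


-- int(c) for a single character c (total form; Pre_ keeps us where Python's int() succeeds)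
def pyDigit (c : Char) : Int := (PySem.Int.ofChars? [c]).getD 0

-- ===== PORT A =====
-- the inner for-loop over map(int, isbn), threading (soma, peso)
def isbnLoop (cs : List Char) : Int × Int :=
  cs.foldl (fun st k => (st.1 + pyDigit k * st.2, if st.2 = 1 then (3 : Int) else 1)) (0, 1)

def isbn (livros : List (String × String)) : List String :=
  let d := PySem.Dict.ofList livros
  let result := d.keys.foldl
    (fun result nome =>
      if PySem.Int.mod (isbnLoop ((d.get? nome).getD "").toList).1 10 ≠ 0
      then result ++ [nome] else result) []
  PySem.List.sorted result (fun x => x) false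

-- ===== PORT B =====
-- checksum(digits): two digits at a time, weights 1 and 3, recursing on digits[2:]
def pairChecksum : List Int → Int
  | d0 :: d1 :: rest => d0 + 3 * d1 + pairChecksum rest
  | [d] => d
  | [] => 0

def isbn_alt (livros : List (String × String)) : List String :=
  let d := PySem.Dict.ofList livros
  let invalid := (d.items.filter
    (fun p => decide (PySem.Int.mod (pairChecksum (p.2.toList.map pyDigit)) 10 ≠ 0))).map Prod.fst
  PySem.List.sorted invalid (fun x => x) false

-- ===== PRECONDITION & SPEC =====
-- Pre_ excludes exactly the inputs where A raises ValueError: a value of the (collapsed) dict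
-- containing a non-digit character makes int(c) raise inside A's inner loop.
def Pre_isbn (livros : List (String × String)) : Prop :=
  ((PySem.Dict.ofList livros).items.all (fun p => p.2.toList.all PySem.Chars.isdigit)) = true
instance (livros : List (String × String)) : Decidable (Pre_isbn livros) := by
  unfold Pre_isbn; infer_instance
def pvWitness_isbn : (List (String × String)) := [("a", "12"), ("b", "0930"), ("c", "")]

def Spec_isbn (livros : List (String × String)) (out : List String) : Prop := out = isbn_alt livros
instance (livros : List (String × String)) (out : List String) : Decidable (Spec_isbn livros out) := by unfold Spec_isbn; infer_instance

-- ===== CLAIM (what is proved, stated in full; the proofs are below) =====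
def Claim_equal_isbn : Prop := ∀ (livros : List (String × String)), Dom_isbn livros → Pre_isbn livros → Spec_isbn livros (isbn livros)

-- ===== LEMMAS AND PROOFS =====

-- A's alternating-weight loop computes B's pairwise checksum (for any starting soma).
theorem isbnLoop_eq_pairChecksum (ds : List Int) : ∀ soma : Int,
    (ds.foldl (fun st k => (st.1 + k * st.2, if st.2 = 1 then (3 : Int) else 1)) (soma, 1)).1
      = soma + pairChecksum ds := by
  induction ds using pairChecksum.induct with
  | case1 d0 d1 rest ih =>
      intro soma
      simp only [List.foldl_cons, pairChecksum]
      norm_num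
      rw [ih]
      ring
  | case2 d => intro soma; simp [pairChecksum]
  | case3 => intro soma; simp [pairChecksum]

theorem isbn_spec_aux (livros : List (String × String)) :
    isbn livros = isbn_alt livros := by
  unfold isbn isbn_alt
  dsimp only
  have hnd : (PySem.Dict.ofList livros).keys.Nodup := PySem.Dict.nodup_keys_ofList livros
  rw [PySem.List.foldl_append_ite_eq_filter]
  rw [PySem.Dict.items_eq_map_keys (PySem.Dict.ofList livros) hnd ""]
  rw [List.filter_map, List.map_map]
  rw [show (Prod.fst ∘ fun k => (k, (PySem.Dict.ofList livros).getD k ""))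
        = (id : String → String) from rfl, List.map_id]
  congr 1
  simp only [List.nil_append]
  apply List.filter_congr
  intro k _
  simp only [Function.comp]
  congr 1
  rw [PySem.Dict.getD_eq_get?_getD]
  unfold isbnLoop
  rw [← List.foldl_map (f := pyDigit)
       (g := fun (st : Int × Int) k => (st.1 + k * st.2, if st.2 = 1 then (3:Int) else 1))]
  rw [isbnLoop_eq_pairChecksum]
  simp

-- ===== VERDICT (by name: the statement is the Claim_ definition above) =====
theorem isbn_spec : Claim_equal_isbn := by
  intro livros _ _
  unfold Spec_isbn
  exact isbn_spec_aux livros
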